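-- pv_equiv track=rewrite | github.com/mehtajm/mehtajm.github.io | files/nyl12Parser.py | split_by_repeating_substring
-- ===== SOURCE A (Python) =====
-- def split_by_repeating_substring(input_str):
--     if len(input_str) < 25:
--         return [(0, len(input_str), input_str)]  # Handle small strings
--
--     pattern = input_str[:25]  # First 25 characters
--     segments = []
--     start_idx = 0
--     search_idx = 25  # Start searching after the first 25 characters
--
--     while True:
--         next_idx = input_str.find(pattern, search_idx)  # Find next occurrence
--         if next_idx == -1:
--             break  # No more occurrences
--
--         segments.append((start_idx, next_idx - start_idx, input_str[start_idx:next_idx]))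
--         start_idx = next_idx
--         search_idx = next_idx + 25  # Move forward
--
--     # Add final segment
--     segments.append((start_idx, len(input_str) - start_idx, input_str[start_idx:]))
--
--     return segments
-- ===== SOURCE B (Python) =====
-- def split_by_repeating_substring(input_str):
--     if len(input_str) < 25:
--         return [(0, len(input_str), input_str)]  # Handle small strings
--
--     pattern = input_str[:25]
--     # str.split finds the same non-overlapping occurrences the find-loop does;
--     # the piece before the first occurrence (at index 0) is empty and is dropped.
--     pieces = input_str.split(pattern)[1:]
--     segments = []
--     pos = 0
--     for piece in pieces:
--         text = pattern + piece
--         segments.append((pos, len(text), text))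
--         pos += len(text)
--     return segments
-- ===== Notes on version B (the rewrite author's own statement) =====
-- stated objective: idiomatic
-- what changed: Replaces the manual find/advance while-loop with str.split on the 25-char prefix (dropping the empty leading piece) followed by a single position-accumulating pass over the pieces.
import Mathlib
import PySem

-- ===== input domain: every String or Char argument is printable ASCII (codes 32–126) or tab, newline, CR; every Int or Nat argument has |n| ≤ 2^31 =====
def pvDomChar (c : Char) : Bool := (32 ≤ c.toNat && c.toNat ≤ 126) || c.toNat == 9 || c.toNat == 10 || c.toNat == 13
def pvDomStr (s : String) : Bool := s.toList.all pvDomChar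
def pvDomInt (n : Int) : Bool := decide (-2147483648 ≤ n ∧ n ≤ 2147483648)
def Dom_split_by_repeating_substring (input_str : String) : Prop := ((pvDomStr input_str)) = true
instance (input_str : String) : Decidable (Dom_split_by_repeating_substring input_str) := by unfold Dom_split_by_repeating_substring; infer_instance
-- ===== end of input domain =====

-- B replaces A's manual find/advance while-loop by splitting on the 25-char prefix and
-- one position-accumulating pass over the pieces (idiomatic; same results, no speed claim).

-- ===== PORT A =====
-- the 'while True' loop; fuel only makes the same computation total (it is never exhausted:
-- search_idx grows by at least 25 per iteration), state (start_idx, search_idx, segments)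
def splitA_loop (s pattern : List Char) (fuel : Nat) (start_idx search_idx : Int)
    (segments : List (Int × Int × String)) : List (Int × Int × String) × Int :=
  match fuel with
  | 0 => (segments, start_idx)
  | fuel + 1 =>
    let next_idx := PySem.Chars.findFrom s pattern search_idx none
    if next_idx = -1 then (segments, start_idx)
    else
      splitA_loop s pattern fuel next_idx (next_idx + 25)
        (segments ++ [(start_idx, next_idx - start_idx,
          String.ofList (PySem.Chars.slice s (some start_idx) (some next_idx)))])

def split_by_repeating_substring (input_str : String) : List (Int × Int × String) :=
  let s := input_str.toList
  if s.length < 25 then [(0, (s.length : Int), input_str)]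
  else
    let pattern := PySem.Chars.slice s none (some 25)
    let r := splitA_loop s pattern s.length 0 25 []
    r.1 ++ [(r.2, (s.length : Int) - r.2,
      String.ofList (PySem.Chars.slice s (some r.2) none))]

-- ===== PORT B =====
-- 'for piece in pieces: segments.append(...); pos += len(text)'
def splitB_fold (pattern : List Char) (st : List (Int × Int × String) × Int)
    (piece : List Char) : List (Int × Int × String) × Int :=
  let text := pattern ++ piece
  (st.1 ++ [(st.2, (text.length : Int), String.ofList text)], st.2 + (text.length : Int))

def split_by_repeating_substring_alt (input_str : String) : List (Int × Int × String) :=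
  let s := input_str.toList
  if s.length < 25 then [(0, (s.length : Int), input_str)]
  else
    let pattern := PySem.Chars.slice s none (some 25)
    let pieces := PySem.List.slice (PySem.Chars.splitOn s pattern) (some 1) none
    (pieces.foldl (splitB_fold pattern) ([], 0)).1

-- ===== PRECONDITION & SPEC =====
def Spec_split_by_repeating_substring (input_str : String) (out : List (Int × Int × String)) : Prop := out = split_by_repeating_substring_alt input_str
instance (input_str : String) (out : List (Int × Int × String)) : Decidable (Spec_split_by_repeating_substring input_str out) := by unfold Spec_split_by_repeating_substring; infer_instance

-- ===== CLAIM (what is proved, stated in full; the proofs are below) =====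
def Claim_equal_split_by_repeating_substring : Prop := ∀ (input_str : String), Dom_split_by_repeating_substring input_str → Spec_split_by_repeating_substring input_str (split_by_repeating_substring input_str)


-- ===== LEMMAS AND PROOFS =====

theorem pvFind_nonneg_prefix (P t : List Char) (h : PySem.Chars.find t P ≠ -1) :
    0 ≤ PySem.Chars.find t P ∧ P <+: List.drop (PySem.Chars.find t P).toNat t := by
  have h0 : (0 : Nat) ≤ t.length := Nat.zero_le _
  have hs := PySem.Chars.findFrom_natCast_spec t P 0 h0
  rw [Nat.cast_zero, PySem.Chars.findFrom_zero] at hs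
  have h2 := hs h
  exact ⟨by exact_mod_cast h2.1, h2.2.1⟩

theorem pvFindGo_shift (P : List Char) (hP : P ≠ []) :
    ∀ (t : List Char) (k : Nat), PySem.Chars.find.go P t k =
      if PySem.Chars.find.go P t 0 = -1 then -1 else (k : Int) + PySem.Chars.find.go P t 0 := by
  intro t
  induction t with
  | nil =>
    intro k
    simp [PySem.Chars.find.go, List.isEmpty_iff, hP]
  | cons c rest ih =>
    intro k
    by_cases hpre : P.isPrefixOf (c :: rest)
    · simp [PySem.Chars.find.go, hpre]
    · rw [show PySem.Chars.find.go P (c :: rest) k = PySem.Chars.find.go P rest (k + 1) by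
        simp [PySem.Chars.find.go, hpre]]
      rw [show PySem.Chars.find.go P (c :: rest) 0 = PySem.Chars.find.go P rest 1 by
        simp [PySem.Chars.find.go, hpre]]
      rw [ih (k + 1), ih 1]
      by_cases h0 : PySem.Chars.find.go P rest 0 = -1
      · simp [h0]
      · have hnn : 0 ≤ PySem.Chars.find.go P rest 0 := (pvFind_nonneg_prefix P rest h0).1
        simp only [if_neg h0]
        rw [if_neg (show ((1:Nat):Int) + PySem.Chars.find.go P rest 0 ≠ -1 by push_cast; omega)]
        push_cast; ring

theorem pvFind_of_prefix (P t : List Char) (hP : P ≠ []) (h : P <+: t) :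
    PySem.Chars.find t P = 0 := by
  cases t with
  | nil => simp [List.prefix_nil] at h; exact absurd h hP
  | cons c rest =>
    have hpre : P.isPrefixOf (c :: rest) = true := List.isPrefixOf_iff_prefix.mpr h
    simp [PySem.Chars.find, PySem.Chars.find.go, hpre]

theorem pvFind_step (P : List Char) (hP : P ≠ []) (c : Char) (rest : List Char)
    (h : ¬ P <+: (c :: rest)) :
    PySem.Chars.find (c :: rest) P =
      if PySem.Chars.find rest P = -1 then -1 else 1 + PySem.Chars.find rest P := by
  have hpre : P.isPrefixOf (c :: rest) = false := by
    rw [Bool.eq_false_iff]; intro hx; exact h (List.isPrefixOf_iff_prefix.mp hx)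
  rw [show PySem.Chars.find (c :: rest) P = PySem.Chars.find.go P rest 1 by
    simp [PySem.Chars.find, PySem.Chars.find.go, hpre]]
  rw [pvFindGo_shift P hP rest 1]
  rfl

def pvPieces (P : List Char) : Nat → List Char → List (List Char)
  | 0, t => [t]
  | pf + 1, t =>
    let r := PySem.Chars.find t P
    if r = -1 then [t]
    else List.take r.toNat t :: pvPieces P pf (List.drop (r.toNat + 25) t)

theorem pvPieces_nil (P : List Char) (hP : P ≠ []) (pf : Nat) : pvPieces P pf [] = [[]] := by
  cases pf with
  | zero => rfl
  | succ q =>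
    have : PySem.Chars.find [] P = -1 := by
      rw [PySem.Chars.find_eq_neg_one_iff]
      intro hinf
      exact hP (List.eq_nil_of_infix_nil hinf)
    simp [pvPieces, this]

theorem pvPieces_step (P : List Char) (hP : P ≠ []) (pf : Nat) (c : Char) (rest : List Char)
    (h : ¬ P <+: (c :: rest)) :
    pvPieces P pf (c :: rest) = (pvPieces P pf rest).modifyHead (fun p => c :: p) := by
  cases pf with
  | zero => rfl
  | succ q =>
    simp only [pvPieces]
    rw [pvFind_step P hP c rest h]
    by_cases h0 : PySem.Chars.find rest P = -1
    · simp [h0]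
    · have hnn : 0 ≤ PySem.Chars.find rest P := (pvFind_nonneg_prefix P rest h0).1
      have hne : (1 : Int) + PySem.Chars.find rest P ≠ -1 := by omega
      simp only [h0, if_false, if_neg hne]
      have ht : ((1 : Int) + PySem.Chars.find rest P).toNat = (PySem.Chars.find rest P).toNat + 1 := by omega
      rw [ht]
      simp [List.modifyHead, List.drop_succ_cons]

theorem pvPieces_match (P t : List Char) (hP25 : P.length = 25) (pf : Nat) (h : P <+: t) :
    pvPieces P (pf + 1) t = [] :: pvPieces P pf (List.drop 25 t) := by
  have hP : P ≠ [] := by intro he; rw [he] at hP25; simp at hP25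
  have h0 : PySem.Chars.find t P = 0 := pvFind_of_prefix P t hP h
  rw [pvPieces]
  simp [h0]

theorem pvModifyHead_modifyHead (l : List (List Char)) (f g : List Char → List Char) :
    (l.modifyHead f).modifyHead g = l.modifyHead (fun x => g (f x)) := by
  cases l <;> rfl

theorem pvGo_eq (P : List Char) (hP25 : P.length = 25) :
    ∀ (fuel : Nat) (t cur : List Char) (acc : List (List Char)) (pf : Nat),
      t.length ≤ fuel → t.length ≤ 25 * pf →
      PySem.Chars.splitOn.go P fuel t cur acc =
        acc.reverse ++ (pvPieces P pf t).modifyHead (fun p => cur.reverse ++ p) := by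
  have hP : P ≠ [] := by intro he; rw [he] at hP25; simp at hP25
  intro fuel
  induction fuel with
  | zero =>
    intro t cur acc pf hf hpf
    have ht : t = [] := List.eq_nil_of_length_eq_zero (Nat.le_zero.mp hf)
    subst ht
    rw [pvPieces_nil P hP]
    simp [PySem.Chars.splitOn.go]
  | succ f ih =>
    intro t cur acc pf hf hpf
    cases t with
    | nil =>
      rw [pvPieces_nil P hP]
      simp [PySem.Chars.splitOn.go]
    | cons c rest =>
      by_cases hpre : P.isPrefixOf (c :: rest)
      · -- match at the head
        have hpfx : P <+: (c :: rest) := List.isPrefixOf_iff_prefix.mp hpre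
        have hlen : 25 ≤ (c :: rest).length := by
          have := hpfx.length_le; omega
        obtain ⟨q, hq⟩ : ∃ q, pf = q + 1 := by
          cases pf with
          | zero => exfalso; simp at hpf
          | succ q => exact ⟨q, rfl⟩
        subst hq
        rw [show PySem.Chars.splitOn.go P (f + 1) (c :: rest) cur acc =
            PySem.Chars.splitOn.go P f (List.drop P.length (c :: rest)) [] (cur.reverse :: acc) by
          simp [PySem.Chars.splitOn.go, hpre]]
        rw [ih (List.drop P.length (c :: rest)) [] (cur.reverse :: acc) q
          (by have h1 := hf; simp [hP25] at h1 ⊢; omega)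
          (by have h1 := hpf; simp [hP25] at h1 ⊢; omega)]
        rw [pvPieces_match P (c :: rest) hP25 q hpfx, hP25]
        cases hpq : pvPieces P q (List.drop 25 (c :: rest)) with
        | nil => simp [List.modifyHead]
        | cons p ps => simp [List.modifyHead]
      · -- no match: shift one character
        have hnpfx : ¬ P <+: (c :: rest) := fun hx => hpre (List.isPrefixOf_iff_prefix.mpr hx)
        rw [show PySem.Chars.splitOn.go P (f + 1) (c :: rest) cur acc =
            PySem.Chars.splitOn.go P f rest (c :: cur) acc by
          simp [PySem.Chars.splitOn.go, hpre]]
        rw [ih rest (c :: cur) acc pf (by simp at hf ⊢; omega) (by simp at hpf ⊢; omega)]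
        rw [pvPieces_step P hP pf c rest hnpfx, pvModifyHead_modifyHead]
        simp
def pvAssemble : List (List Char) → Int → List (Int × Int × String)
  | [], _ => []
  | x :: xs, pos => (pos, (x.length : Int), String.ofList x) :: pvAssemble xs (pos + (x.length : Int))

theorem pvFold_eq (P : List Char) :
    ∀ (pieces : List (List Char)) (segs : List (Int × Int × String)) (pos : Int),
      (pieces.foldl (splitB_fold P) (segs, pos)).1 =
        segs ++ pvAssemble (pieces.map (fun p => P ++ p)) pos := by
  intro pieces
  induction pieces with
  | nil => intro segs pos; simp [pvAssemble]
  | cons p ps ih =>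
    intro segs pos
    simp only [List.foldl_cons, List.map_cons, pvAssemble, splitB_fold]
    rw [ih]
    simp [List.append_assoc]

theorem pvPieces_of_find_neg (P : List Char) (pf : Nat) (t : List Char)
    (hr : PySem.Chars.find t P = -1) : pvPieces P pf t = [t] := by
  cases pf with
  | zero => rfl
  | succ q => simp [pvPieces, hr]

theorem pvAloop_eq (s P : List Char) (hP : P = List.take 25 s) (h25 : 25 ≤ s.length) :
    ∀ (fuel pf : Nat) (b : Nat) (segs : List (Int × Int × String)),
      b + 25 ≤ s.length → s.length - b ≤ fuel →
      (List.drop (b + 25) s).length ≤ 25 * pf →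
      P <+: List.drop b s →
      (splitA_loop s P fuel (b : Int) ((b : Int) + 25) segs).1
        ++ [((splitA_loop s P fuel (b : Int) ((b : Int) + 25) segs).2,
             (s.length : Int) - (splitA_loop s P fuel (b : Int) ((b : Int) + 25) segs).2,
             String.ofList (PySem.Chars.slice s
               (some (splitA_loop s P fuel (b : Int) ((b : Int) + 25) segs).2) none))]
      = segs ++ pvAssemble ((pvPieces P pf (List.drop (b + 25) s)).map (fun p => P ++ p)) (b : Int) := by
  have hP25 : P.length = 25 := by rw [hP]; simp [List.length_take]; exact h25
  have hPne : P ≠ [] := by intro he; rw [he] at hP25; simp at hP25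
  intro fuel
  induction fuel with
  | zero => intro pf b segs h1 h2 h3 h4; omega
  | succ f ih =>
    intro pf b segs h1 h2 h3 h4
    -- the prefix at b lets us rewrite drop b s
    obtain ⟨u, hu⟩ := h4
    have hu' : List.drop (b + 25) s = u := by
      have : List.drop (b + 25) s = List.drop 25 (List.drop b s) := by
        rw [List.drop_drop]
      rw [this, ← hu, ← hP25, List.drop_left]
    have hdropb : List.drop b s = P ++ List.drop (b + 25) s := by rw [hu', hu]
    -- the findFrom call
    have hk : b + 25 ≤ s.length := h1
    have hff : PySem.Chars.findFrom s P ((b : Int) + 25) none =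
        if PySem.Chars.find (List.drop (b + 25) s) P = -1 then -1
        else ((b + 25 : Nat) : Int) + PySem.Chars.find (List.drop (b + 25) s) P := by
      have := PySem.Chars.findFrom_natCast s P (b + 25) hk
      push_cast at this ⊢
      exact this
    set t := List.drop (b + 25) s with hts
    by_cases hr : PySem.Chars.find t P = -1
    · -- no further occurrence: the loop stops, one final segment
      rw [pvPieces_of_find_neg P pf t hr]
      have hstep : splitA_loop s P (f + 1) (b : Int) ((b : Int) + 25) segs = (segs, (b : Int)) := by
        simp [splitA_loop, hff, hr]
      rw [hstep]
      simp only [List.map_cons, List.map_nil, pvAssemble]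
      have hslice : PySem.Chars.slice s (some (b : Int)) none = List.drop b s := by
        rw [PySem.Chars.slice_eq_listSlice, PySem.List.slice_from _ (by positivity : (0:Int) ≤ (b:Int))]
        simp
      rw [hslice, hdropb]
      have hlen : ((P ++ t).length : Int) = (s.length : Int) - (b : Int) := by
        rw [← hdropb]; simp [List.length_drop]; omega
      rw [hlen]
    · -- an occurrence at b + 25 + ρ
      have hρ := pvFind_nonneg_prefix P t hr
      set ρ := (PySem.Chars.find t P).toNat with hρdef
      have hrρ : PySem.Chars.find t P = (ρ : Int) := by omega
      have hρ25 : ρ + 25 ≤ t.length := by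
        have := hρ.2.length_le
        simp [List.length_drop, hP25] at this
        omega
      have htlen : t.length = s.length - (b + 25) := by simp [hts]
      -- pf must be positive
      obtain ⟨q, hq⟩ : ∃ q, pf = q + 1 := by
        cases pf with
        | zero => exfalso; omega
        | succ q => exact ⟨q, rfl⟩
      subst hq
      set next := b + 25 + ρ with hnext
      have hdnext : List.drop ρ t = List.drop next s := by
        rw [hts, List.drop_drop]
      have hpnext : P <+: List.drop next s := by rw [← hdnext]; exact hρ.2
      have hdnext25 : List.drop (ρ + 25) t = List.drop (next + 25) s := by
        rw [hts, List.drop_drop]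
        congr 1
      -- the segment the loop appends
      have hseg : PySem.Chars.slice s (some (b : Int)) (some ((next : Nat) : Int)) =
          P ++ List.take ρ t := by
        simp only [PySem.Chars.slice_eq_listSlice, PySem.List.slice_natCast]
        have : next - b = 25 + ρ := by omega
        rw [this, hdropb, ← hP25, List.take_length_add_append]
      have hsteplen : ((P ++ List.take ρ t).length : Int) = ((next : Nat) : Int) - (b : Int) := by
        simp [hP25, List.length_take]
        omega
      have hnn : (0:Int) ≤ (b:Int) + 25 + PySem.Chars.find t P := by
        have := hρ.1; positivity
      have hne : ((b:Int) + 25 + PySem.Chars.find t P) ≠ -1 := by omega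
      have hstep : splitA_loop s P (f + 1) (b : Int) ((b : Int) + 25) segs =
          splitA_loop s P f ((next : Nat) : Int) (((next : Nat) : Int) + 25)
            (segs ++ [((b : Int), ((next : Nat) : Int) - (b : Int),
              String.ofList (PySem.Chars.slice s (some (b : Int)) (some ((next : Nat) : Int))))]) := by
        simp only [splitA_loop, hff, if_neg hr]
        rw [if_neg (by push_cast; omega)]
        have hcast : ((b + 25 : Nat) : Int) + PySem.Chars.find t P = ((next : Nat) : Int) := by
          rw [hrρ]; push_cast [hnext]; ring
        rw [hcast]
      rw [hstep, ih (q) next _ (by have := hpnext.length_le; simp [List.length_drop, hP25] at this; omega)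
        (by omega)
        (by simp [List.length_drop] at h3 ⊢; omega)
        hpnext]
      -- both sides are segs ++ head :: rest
      rw [show pvPieces P (q + 1) t =
          List.take ρ t :: pvPieces P q (List.drop (ρ + 25) t) by
        simp [pvPieces, hrρ]]
      simp only [List.map_cons, pvAssemble, hdnext25]
      rw [hseg, hsteplen]
      have hpos : (b : Int) + ((P ++ List.take ρ t).length : Int) = ((next : Nat) : Int) := by
        simp [hP25, List.length_take]; omega
      rw [← hpos]
      simp [List.append_assoc]

theorem pv_main (input_str : String) :
    split_by_repeating_substring input_str = split_by_repeating_substring_alt input_str := by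
  by_cases h : input_str.toList.length < 25
  · have h2 : input_str.length < 25 := by simpa using h
    simp [split_by_repeating_substring, split_by_repeating_substring_alt, h2]
  · have h25 : 25 ≤ input_str.toList.length := by omega
    set l := input_str.toList with hl
    obtain ⟨m, hm⟩ : ∃ m, l.length = m + 1 := ⟨l.length - 1, by omega⟩
    have hpat : PySem.Chars.slice l none (some 25) = List.take 25 l := by
      rw [PySem.Chars.slice_eq_listSlice, PySem.List.slice_to _ (by norm_num : (0:Int) ≤ (25:Int))]
      rfl
    set P := List.take 25 l with hPdef
    have hP25 : P.length = 25 := by simp [hPdef, List.length_take]; exact h25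
    have hPpre : P <+: l := List.take_prefix 25 l
    have hA : split_by_repeating_substring input_str =
        pvAssemble ((pvPieces P m (List.drop 25 l)).map (fun p => P ++ p)) 0 := by
      simp only [split_by_repeating_substring, ← hl, if_neg (by omega : ¬ l.length < 25), hpat]
      have := pvAloop_eq l P hPdef h25 l.length m 0 []
        (by omega) (by omega)
        (by simp [List.length_drop]; omega)
        (by simpa using hPpre)
      simpa using this
    have hB : split_by_repeating_substring_alt input_str =
        pvAssemble ((pvPieces P m (List.drop 25 l)).map (fun p => P ++ p)) 0 := by
      simp only [split_by_repeating_substring_alt, ← hl, if_neg (by omega : ¬ l.length < 25), hpat]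
      rw [PySem.List.slice_from_one]
      rw [show PySem.Chars.splitOn l P = PySem.Chars.splitOn.go P (l.length + 1) l [] [] from rfl]
      rw [pvGo_eq P hP25 (l.length + 1) l [] [] (m + 1) (by omega) (by omega)]
      rw [pvPieces_match P l hP25 m hPpre]
      simp [List.modifyHead]
      rw [pvFold_eq P]
      simp
    rw [hA, hB]

-- ===== VERDICT (by name: the statement is the Claim_ definition above) =====
theorem split_by_repeating_substring_spec : Claim_equal_split_by_repeating_substring := by
  unfold Claim_equal_split_by_repeating_substring Spec_split_by_repeating_substring
  intro input_str _
  exact pv_main input_str
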